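-- pv_equiv track=rewrite | github.com/timoxa0/Reshala | convert.py | clearStr
-- ===== SOURCE A (Python) =====
-- def clearStr(input, mask):
--     l = [i for i in input]
--     m = [i for i in mask]
--     l.sort()
--     m.sort()
--     for i in m:
--         l.remove(i)
--     if len(l) >= 1:
--         l = list(dict.fromkeys(l))[0]
--     elif l == []:
--         l = ''
--     return l
-- ===== SOURCE B (Python) =====
-- def clearStr(input, mask):
--     cnt = {}
--     for ch in input:
--         cnt[ch] = cnt.get(ch, 0) + 1
--     for ch in mask:
--         n = cnt.get(ch, 0)
--         if n <= 0:
--             raise ValueError(f"{ch!r} not in input")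
--         cnt[ch] = n - 1
--     best = None
--     for ch, n in cnt.items():
--         if n > 0 and (best is None or ch < best):
--             best = ch
--     return best if best is not None else ''
-- ===== Notes on version B (the rewrite author's own statement) =====
-- stated objective: faster
-- what changed: replaces sort-both-strings plus a list.remove per mask char (and a dedup pass) by one dict-counter sweep: count input chars, subtract mask counts, return the smallest char with positive residual count
import Mathlib
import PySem

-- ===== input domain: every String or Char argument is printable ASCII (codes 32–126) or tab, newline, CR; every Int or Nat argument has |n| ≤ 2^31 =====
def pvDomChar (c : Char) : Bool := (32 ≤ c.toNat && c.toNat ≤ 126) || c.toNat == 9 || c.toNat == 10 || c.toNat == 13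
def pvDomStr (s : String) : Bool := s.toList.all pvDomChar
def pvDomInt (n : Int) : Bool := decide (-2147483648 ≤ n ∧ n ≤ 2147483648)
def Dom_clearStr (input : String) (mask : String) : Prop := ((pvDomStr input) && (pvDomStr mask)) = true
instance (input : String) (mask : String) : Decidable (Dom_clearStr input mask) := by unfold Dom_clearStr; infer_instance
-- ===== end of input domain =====

-- B replaces A's sort + per-mask-char list.remove + dedup by a single counter sweep (objective: faster).


-- ===== PORT A =====
def clearStr (input : String) (mask : String) : String :=
  let l := PySem.List.sorted input.toList (fun c => c) false
  let m := PySem.List.sorted mask.toList (fun c => c) false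
  -- 'for i in m: l.remove(i)' — remove? is none exactly where Python raises ValueError (excluded by Pre_)
  match m.foldl (fun acc i => acc.bind (fun xs => PySem.List.remove? xs i)) (some l) with
  | none => ""
  | some l2 =>
    if l2.length ≥ 1 then
      -- 'l = list(dict.fromkeys(l))[0]'
      match PySem.List.pyGet? (PySem.List.dedup l2) 0 with
      | some c => String.ofList [c]
      | none => ""
    else ""

-- ===== PORT B =====
def pvBStep (best : Option Char) (p : Char × Int) : Option Char :=
  if 0 < p.2 then
    match best with
    | none => some p.1
    | some b => if p.1 < b then some p.1 else some b
  else best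

def clearStr_alt (input : String) (mask : String) : String :=
  let cnt0 := input.toList.foldl (fun d ch => d.insert ch (d.getD ch 0 + 1)) (PySem.Dict.empty : PySem.Dict Char Int)
  -- 'n = cnt.get(ch, 0); if n <= 0: raise ValueError; cnt[ch] = n - 1' — none exactly where Python B raises (excluded by Pre_)
  match mask.toList.foldl (fun acc ch => acc.bind (fun d =>
      if d.getD ch 0 ≤ 0 then none else some (d.insert ch (d.getD ch 0 - 1)))) (some cnt0) with
  | none => ""
  | some cnt =>
    match cnt.items.foldl pvBStep none with
    | some b => String.ofList [b]
    | none => ""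

-- ===== PRECONDITION & SPEC =====
-- Pre_ excludes exactly the inputs where A's list.remove raises ValueError: some mask char
-- occurs more often in the mask than in the input.
def Pre_clearStr (input : String) (mask : String) : Prop :=
  (mask.toList.all (fun c => mask.toList.count c ≤ input.toList.count c)) = true
instance (input : String) (mask : String) : Decidable (Pre_clearStr input mask) := by
  unfold Pre_clearStr; infer_instance

def pvWitness_clearStr : String × String := ("bacb", "ab")

def Spec_clearStr (input : String) (mask : String) (out : String) : Prop := out = clearStr_alt input mask
instance (input : String) (mask : String) (out : String) : Decidable (Spec_clearStr input mask out) := by unfold Spec_clearStr; infer_instance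

-- ===== CLAIM (what is proved, stated in full; the proofs are below) =====
def Claim_equal_clearStr : Prop := ∀ (input : String) (mask : String), Dom_clearStr input mask → Pre_clearStr input mask → Spec_clearStr input mask (clearStr input mask)

-- ===== LEMMAS AND PROOFS =====

-- A's remove loop succeeds and equals the erase fold when every mask char is covered
theorem pvFoldRemove (ms : List Char) : ∀ (xs : List Char), (∀ c, ms.count c ≤ xs.count c) →
    ms.foldl (fun acc i => acc.bind (fun l => PySem.List.remove? l i)) (some xs)
      = some (ms.foldl (fun l i => l.erase i) xs) := by
  induction ms with
  | nil => intro xs h; rfl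
  | cons i t ih =>
    intro xs h
    have hi : i ∈ xs := by
      have := h i
      simp [List.count_cons_self] at this
      exact List.count_pos_iff.mp (by omega)
    rw [List.foldl_cons, List.foldl_cons, Option.bind_some,
      PySem.List.remove?_eq_some_erase _ _ hi]
    apply ih
    intro c
    have hc := h c
    rw [List.count_erase]
    by_cases hci : c = i
    · subst hci; simp [List.count_cons_self] at hc; simp; omega
    · have : (i == c) = false := by simp [Ne.symm hci]
      rw [this]
      simp [Ne.symm hci] at hc ⊢
      omega

theorem pvCountFoldErase (ms : List Char) : ∀ (xs : List Char), (∀ c, ms.count c ≤ xs.count c) →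
    ∀ c, (ms.foldl (fun l i => l.erase i) xs).count c = xs.count c - ms.count c := by
  induction ms with
  | nil => intro xs h c; simp
  | cons i t ih =>
    intro xs h c
    rw [List.foldl_cons]
    have hstep : ∀ c', t.count c' ≤ (xs.erase i).count c' := by
      intro c'
      have hc := h c'
      rw [List.count_erase]
      by_cases hci : c' = i
      · subst hci; simp [List.count_cons_self] at hc; simp; omega
      · have : (i == c') = false := by simp [Ne.symm hci]
        rw [this]
        simp [Ne.symm hci] at hc ⊢
        omega
    rw [ih (xs.erase i) hstep c, List.count_erase]
    have hc := h c
    by_cases hci : c = i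
    · subst hci; simp [List.count_cons_self] at hc ⊢; omega
    · have : (i == c) = false := by simp [Ne.symm hci]
      rw [this]
      simp [Ne.symm hci]

theorem pvFoldEraseSublist (ms : List Char) : ∀ (xs : List Char),
    (ms.foldl (fun l i => l.erase i) xs).Sublist xs := by
  induction ms with
  | nil => intro xs; simp
  | cons i t ih =>
    intro xs
    rw [List.foldl_cons]
    exact (ih (xs.erase i)).trans (List.erase_sublist)

theorem pvFoldAddHead (t : List Char) : ∀ (s : List Char), s ≠ [] →
    (t.foldl PySem.Set.add s).head? = s.head? := by
  induction t with
  | nil => intro s hs; rfl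
  | cons x r ih =>
    intro s hs
    rw [List.foldl_cons]
    by_cases hx : x ∈ s
    · rw [show PySem.Set.add s x = s by simp [PySem.Set.add, hx]]
      exact ih s hs
    · have hadd : PySem.Set.add s x = s ++ [x] := by
        simp [PySem.Set.add, hx]
      rw [hadd, ih (s ++ [x]) (by simp)]
      cases s with
      | nil => exact absurd rfl hs
      | cons a b => simp

theorem pvDedupGet (d : Char) (t : List Char) :
    PySem.List.pyGet? (PySem.List.dedup (d :: t)) 0 = some d := by
  have h1 : PySem.List.dedup (d :: t) = t.foldl PySem.Set.add [d] := by
    simp [PySem.Set.ofList_eq_foldl]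
  have h2 := pvFoldAddHead t [d] (by simp)
  rw [h1]
  cases hE : t.foldl PySem.Set.add [d] with
  | nil => rw [hE] at h2; simp at h2
  | cons a b =>
    rw [hE] at h2; simp at h2
    subst h2
    simp [PySem.List.pyGet?, PySem.List.pyIdx?]

theorem pvStepSome (best : Option Char) (p : Char × Int) (hp : 0 < p.2) :
    ∀ v, pvBStep best p = some v → (v = p.1 ∨ best = some v) ∧ v ≤ p.1 ∧ (∀ b, best = some b → v ≤ b) := by
  intro v hv
  cases best with
  | none =>
    rw [show pvBStep none p = some p.1 from by simp [pvBStep, hp]] at hv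
    injection hv with hv
    exact ⟨Or.inl hv.symm, le_of_eq hv.symm, by simp⟩
  | some b =>
    by_cases hlt : p.1 < b
    · rw [show pvBStep (some b) p = some p.1 from by simp [pvBStep, hp, hlt]] at hv
      injection hv with hv
      refine ⟨Or.inl hv.symm, le_of_eq hv.symm, ?_⟩
      intro b' hb'
      injection hb' with hb'
      rw [← hv, ← hb']
      exact le_of_lt hlt
    · rw [show pvBStep (some b) p = some b from by simp [pvBStep, hp, hlt]] at hv
      injection hv with hv
      refine ⟨Or.inr (by rw [hv]), by rw [← hv]; exact le_of_not_gt hlt, ?_⟩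
      intro b' hb'
      injection hb' with hb'
      rw [← hv, ← hb']

theorem pvStepNotNone (best : Option Char) (p : Char × Int) (hp : 0 < p.2) :
    pvBStep best p ≠ none := by
  cases best <;> simp [pvBStep, hp]
  split <;> simp

theorem pvFoldMinNone (ps : List (Char × Int)) : ∀ (best : Option Char),
    ps.foldl pvBStep best = none ↔ (best = none ∧ ∀ p ∈ ps, ¬ 0 < p.2) := by
  induction ps with
  | nil => intro best; simp
  | cons p t ih =>
    intro best
    by_cases hp : 0 < p.2
    · rw [List.foldl_cons, ih]
      constructor
      · rintro ⟨hb, -⟩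
        exact absurd hb (pvStepNotNone best p hp)
      · rintro ⟨-, hall⟩
        exact absurd hp (hall p List.mem_cons_self)
    · have hb : pvBStep best p = best := by simp [pvBStep, hp]
      rw [List.foldl_cons, hb, ih]
      constructor
      · rintro ⟨h1, h2⟩
        refine ⟨h1, ?_⟩
        intro q hq
        rcases List.mem_cons.mp hq with h | h
        · rw [h]; exact hp
        · exact h2 q h
      · rintro ⟨h1, h2⟩
        exact ⟨h1, fun q hq => h2 q (List.mem_cons_of_mem _ hq)⟩

theorem pvFoldMin (ps : List (Char × Int)) : ∀ (best : Option Char) (m : Char),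
    ps.foldl pvBStep best = some m →
      ((∃ p ∈ ps, p.1 = m ∧ 0 < p.2) ∨ best = some m) ∧
      (∀ p ∈ ps, 0 < p.2 → m ≤ p.1) ∧ (∀ b, best = some b → m ≤ b) := by
  induction ps with
  | nil =>
    intro best m h
    simp at h
    subst h
    exact ⟨Or.inr rfl, by simp, by intro b hb; injection hb with hb; rw [hb]⟩
  | cons p t ih =>
    intro best m h
    rw [List.foldl_cons] at h
    obtain ⟨hex, hmin, hbest⟩ := ih (pvBStep best p) m h
    by_cases hp : 0 < p.2
    · refine ⟨?_, ?_, ?_⟩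
      · rcases hex with hex | hbv
        · obtain ⟨q, hq, hqm, hqpos⟩ := hex
          exact Or.inl ⟨q, List.mem_cons_of_mem _ hq, hqm, hqpos⟩
        · obtain ⟨hc, -, -⟩ := pvStepSome best p hp m hbv
          rcases hc with hc | hc
          · exact Or.inl ⟨p, List.mem_cons_self, hc.symm, hp⟩
          · exact Or.inr hc
      · intro q hq hqpos
        rcases List.mem_cons.mp hq with hqp | hqt
        · rw [hqp]
          cases hv : pvBStep best p with
          | none => exact absurd hv (pvStepNotNone best p hp)
          | some v =>
            obtain ⟨-, hvle, -⟩ := pvStepSome best p hp v hv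
            exact le_trans (hbest v hv) hvle
        · exact hmin q hqt hqpos
      · intro b hb
        cases hv : pvBStep best p with
        | none => exact absurd hv (pvStepNotNone best p hp)
        | some v =>
          obtain ⟨-, -, hvb⟩ := pvStepSome best p hp v hv
          exact le_trans (hbest v hv) (hvb b hb)
    · have hstep : pvBStep best p = best := by simp [pvBStep, hp]
      rw [hstep] at hex hbest
      refine ⟨?_, ?_, hbest⟩
      · rcases hex with hex | hex
        · obtain ⟨q, hq, hqm, hqpos⟩ := hex
          exact Or.inl ⟨q, List.mem_cons_of_mem _ hq, hqm, hqpos⟩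
        · exact Or.inr hex
      · intro q hq hqpos
        rcases List.mem_cons.mp hq with hqp | hqt
        · rw [hqp] at hqpos; exact absurd hqpos hp
        · exact hmin q hqt hqpos

theorem pvGetDSub (l : List Char) : ∀ (d : PySem.Dict Char Int) (v : Char),
    (l.foldl (fun d x => d.insert x (d.getD x 0 - 1)) d).getD v 0 = d.getD v 0 - l.count v := by
  induction l with
  | nil => intro d v; simp
  | cons x t ih =>
    intro d v
    rw [List.foldl_cons, ih, PySem.Dict.getD_insert]
    by_cases hvx : v = x
    · subst hvx; rw [if_pos rfl, List.count_cons_self]; push_cast; ring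
    · rw [if_neg hvx, List.count_cons_of_ne (Ne.symm hvx)]

theorem pvFoldSubCheck (ms : List Char) : ∀ (d : PySem.Dict Char Int),
    (∀ c, (ms.count c : Int) ≤ d.getD c 0) →
    ms.foldl (fun acc ch => acc.bind (fun d =>
        if d.getD ch 0 ≤ 0 then none else some (d.insert ch (d.getD ch 0 - 1)))) (some d)
      = some (ms.foldl (fun d ch => d.insert ch (d.getD ch 0 - 1)) d) := by
  induction ms with
  | nil => intro d h; rfl
  | cons x t ih =>
    intro d h
    have hx : ¬ d.getD x 0 ≤ 0 := by
      have := h x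
      rw [List.count_cons_self] at this
      push_cast at this
      omega
    rw [List.foldl_cons, List.foldl_cons, Option.bind_some, if_neg hx]
    apply ih
    intro c
    have hc := h c
    rw [PySem.Dict.getD_insert]
    by_cases hcx : c = x
    · subst hcx
      rw [if_pos rfl]
      rw [List.count_cons_self] at hc
      push_cast at hc
      omega
    · rw [if_neg hcx]
      rw [List.count_cons_of_ne (Ne.symm hcx)] at hc
      exact hc

theorem clearStr_main : ∀ (input : String) (mask : String), Pre_clearStr input mask → clearStr input mask = clearStr_alt input mask := by
  intro input mask hpre
  have hcnt : ∀ c, mask.toList.count c ≤ input.toList.count c := by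
    intro c
    by_cases hc : c ∈ mask.toList
    · have := (List.all_eq_true.mp hpre) c hc
      simpa using this
    · simp [List.count_eq_zero.mpr hc]
  have hfoldB := pvFoldSubCheck mask.toList
      (input.toList.foldl (fun d ch => d.insert ch (d.getD ch 0 + 1)) (PySem.Dict.empty : PySem.Dict Char Int))
      (by intro c
          rw [PySem.Dict.getD_foldl_insert_add_one, PySem.Dict.getD_empty]
          have := hcnt c
          omega)
  have hsLc : ∀ c, (PySem.List.sorted input.toList (fun c => c) false).count c = input.toList.count c :=
    fun c => (PySem.List.sorted_perm (xs := input.toList) (key := fun c => c) (rev := false)).count_eq c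
  have hsMc : ∀ c, (PySem.List.sorted mask.toList (fun c => c) false).count c = mask.toList.count c :=
    fun c => (PySem.List.sorted_perm (xs := mask.toList) (key := fun c => c) (rev := false)).count_eq c
  have hcnt' : ∀ c, (PySem.List.sorted mask.toList (fun c => c) false).count c
      ≤ (PySem.List.sorted input.toList (fun c => c) false).count c := by
    intro c; rw [hsLc, hsMc]; exact hcnt c
  have hfold := pvFoldRemove _ _ hcnt'
  have hEcnt := pvCountFoldErase _ _ hcnt'
  -- E's counts vs the raw strings, as integers
  have hEcntLM : ∀ c, (((PySem.List.sorted mask.toList (fun c => c) false).foldl (fun l i => l.erase i)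
      (PySem.List.sorted input.toList (fun c => c) false)).count c : Int)
        = (input.toList.count c : Int) - mask.toList.count c := by
    intro c
    have h1 := hEcnt c
    have h2 := hcnt' c
    rw [hsLc, hsMc] at h1 h2
    omega
  have hEsorted : ((PySem.List.sorted mask.toList (fun c => c) false).foldl (fun l i => l.erase i)
      (PySem.List.sorted input.toList (fun c => c) false)).Pairwise (fun a b => a ≤ b) := by
    have hp := PySem.List.sorted_pairwise (xs := input.toList) (key := fun c => c)
    exact List.Pairwise.sublist (pvFoldEraseSublist _ _) hp
  -- B side counter facts
  have hresid : ∀ c, ((mask.toList.foldl (fun d ch => d.insert ch (d.getD ch 0 - 1))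
      (input.toList.foldl (fun d ch => d.insert ch (d.getD ch 0 + 1)) (PySem.Dict.empty : PySem.Dict Char Int))).getD c 0)
        = (((PySem.List.sorted mask.toList (fun c => c) false).foldl (fun l i => l.erase i)
            (PySem.List.sorted input.toList (fun c => c) false)).count c : Int) := by
    intro c
    rw [pvGetDSub, PySem.Dict.getD_foldl_insert_add_one, PySem.Dict.getD_empty, hEcntLM c]
    ring
  have hnodup : ((mask.toList.foldl (fun d ch => d.insert ch (d.getD ch 0 - 1))
      (input.toList.foldl (fun d ch => d.insert ch (d.getD ch 0 + 1)) (PySem.Dict.empty : PySem.Dict Char Int)))).keys.Nodup :=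
    PySem.Dict.nodup_keys_foldl_insert _ _ _ (PySem.Dict.nodup_keys_foldl_insert _ _ _ PySem.Dict.nodup_keys_empty)
  have hitems := PySem.Dict.items_eq_map_keys _ hnodup (0 : Int)
  have hkeymem : ∀ c, ((mask.toList.foldl (fun d ch => d.insert ch (d.getD ch 0 - 1))
      (input.toList.foldl (fun d ch => d.insert ch (d.getD ch 0 + 1)) (PySem.Dict.empty : PySem.Dict Char Int))).getD c 0) ≠ 0 →
      c ∈ ((mask.toList.foldl (fun d ch => d.insert ch (d.getD ch 0 - 1))
      (input.toList.foldl (fun d ch => d.insert ch (d.getD ch 0 + 1)) (PySem.Dict.empty : PySem.Dict Char Int)))).keys := by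
    intro c h
    by_contra hc
    have hcc : (mask.toList.foldl (fun d ch => d.insert ch (d.getD ch 0 - 1))
      (input.toList.foldl (fun d ch => d.insert ch (d.getD ch 0 + 1)) (PySem.Dict.empty : PySem.Dict Char Int))).contains c = false := by
      cases hcb : (mask.toList.foldl (fun d ch => d.insert ch (d.getD ch 0 - 1))
        (input.toList.foldl (fun d ch => d.insert ch (d.getD ch 0 + 1)) (PySem.Dict.empty : PySem.Dict Char Int))).contains c
      · rfl
      · exact absurd ((PySem.Dict.contains_iff_mem_keys _ c).mp hcb) hc
    exact h (PySem.Dict.getD_of_not_contains _ 0 hcc)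
  have hmemItems : ∀ c, (0:Int) < (((PySem.List.sorted mask.toList (fun c => c) false).foldl (fun l i => l.erase i)
      (PySem.List.sorted input.toList (fun c => c) false)).count c : Int) →
      (c, ((mask.toList.foldl (fun d ch => d.insert ch (d.getD ch 0 - 1))
        (input.toList.foldl (fun d ch => d.insert ch (d.getD ch 0 + 1)) (PySem.Dict.empty : PySem.Dict Char Int))).getD c 0))
        ∈ ((mask.toList.foldl (fun d ch => d.insert ch (d.getD ch 0 - 1))
        (input.toList.foldl (fun d ch => d.insert ch (d.getD ch 0 + 1)) (PySem.Dict.empty : PySem.Dict Char Int))).items) := by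
    intro c hcpos
    rw [hitems]
    exact List.mem_map.mpr ⟨c, hkeymem c (by rw [hresid c]; omega), rfl⟩
  cases hE : (PySem.List.sorted mask.toList (fun c => c) false).foldl (fun l i => l.erase i)
      (PySem.List.sorted input.toList (fun c => c) false) with
  | nil =>
    have hBnone : ((mask.toList.foldl (fun d ch => d.insert ch (d.getD ch 0 - 1))
        (input.toList.foldl (fun d ch => d.insert ch (d.getD ch 0 + 1)) (PySem.Dict.empty : PySem.Dict Char Int))).items).foldl pvBStep none = none := by
      rw [pvFoldMinNone]
      refine ⟨rfl, ?_⟩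
      intro p hp
      rw [hitems] at hp
      obtain ⟨k, hk, rfl⟩ := List.mem_map.mp hp
      have := hresid k
      rw [hE] at this
      simp at this
      simp [this]
    simp only [clearStr, clearStr_alt]
    rw [hfold, hE, hfoldB]
    simp [hBnone]
  | cons d t =>
    have hdpos : (0:Int) < (((PySem.List.sorted mask.toList (fun c => c) false).foldl (fun l i => l.erase i)
        (PySem.List.sorted input.toList (fun c => c) false)).count d : Int) := by
      rw [hE]
      simp [List.count_cons_self]
    cases hB : ((mask.toList.foldl (fun d ch => d.insert ch (d.getD ch 0 - 1))
        (input.toList.foldl (fun d ch => d.insert ch (d.getD ch 0 + 1)) (PySem.Dict.empty : PySem.Dict Char Int))).items).foldl pvBStep none with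
    | none =>
      rw [pvFoldMinNone] at hB
      have h2 := hB.2 _ (hmemItems d hdpos)
      rw [hresid d] at h2
      exact absurd hdpos h2
    | some m =>
      obtain ⟨hex, hmin, -⟩ := pvFoldMin _ _ _ hB
      have hmd : m = d := by
        have hmled : m ≤ d := by
          have := hmin _ (hmemItems d hdpos) (by rw [hresid d]; exact hdpos)
          simpa using this
        have hdlem : d ≤ m := by
          rcases hex with hex | hex
          · obtain ⟨p, hp, hpm, hppos⟩ := hex
            rw [hitems] at hp
            obtain ⟨k, hk, rfl⟩ := List.mem_map.mp hp
            simp only at hpm hppos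
            rw [hresid k] at hppos
            have hkE : k ∈ (d :: t) := by
              rw [← hE]
              exact List.count_pos_iff.mp (by omega)
            rcases List.mem_cons.mp hkE with hkd | hkt
            · rw [← hpm, hkd]
            · rw [← hpm]
              exact List.rel_of_pairwise_cons (hE ▸ hEsorted) hkt
          · exact absurd hex (by simp)
        exact le_antisymm hmled hdlem
      have hg : PySem.List.pyGet? (PySem.Set.ofList (d :: t)) 0 = some d := by
        have hdg := pvDedupGet d t
        rwa [PySem.List.dedup_eq_ofList] at hdg
      simp only [clearStr, clearStr_alt]
      rw [hfold, hE, hfoldB]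
      simp [hB, hmd, hg]

-- ===== VERDICT (by name: the statement is the Claim_ definition above) =====
theorem clearStr_spec : Claim_equal_clearStr := by
  intro input mask _ hpre
  exact clearStr_main input mask hpre
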